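-- pv_equiv track=rewrite | github.com/lpaz192/p1_mita_grupo8_2024 | CuentasSPAM/clasificacion.py | contar_hashtags_spam
-- ===== SOURCE A (Python) =====
-- def contar_hashtags_spam(hashtags_dict, spam_set, index=0, count=0):
--     hashtag_keys = list(hashtags_dict.keys())
--
--     # si se recorrio todos los hashtags
--     if index >= len(hashtag_keys):
--         return count
--
--     # revisa si el hashtag actual está en la lista de spam
--     hashtag_actual = hashtag_keys[index]
--     if hashtag_actual in spam_set:
--         count += 1
--
--     # llamada recursiva avanzando al siguiente indice
--     return contar_hashtags_spam(hashtags_dict, spam_set, index + 1, count)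
-- ===== SOURCE B (Python) =====
-- def contar_hashtags_spam(hashtags_dict, spam_set, index=0, count=0):
--     keys = list(hashtags_dict.keys())
--     return count + sum(1 for k in keys[index:] if k in spam_set)
-- ===== Notes on version B (the rewrite author's own statement) =====
-- stated objective: simpler
-- what changed: Replaced the index/count tail recursion (which rebuilds the key list on every call) with a single slice-and-sum comprehension over keys[index:].
-- intended difference: For a nonempty dict with -len <= index < 0 and at least one key in spam_set, A's negative indexing wraps around and then continues through the entire key list, returning count plus the spam keys of keys[index:] plus ALL spam keys again (a double count); B returns count plus the spam keys of keys[index:], the intended suffix count. — e.g. on contar_hashtags_spam([("a", 1)], ["a"], -1, 0): A returns 2, B returns 1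
import Mathlib
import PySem

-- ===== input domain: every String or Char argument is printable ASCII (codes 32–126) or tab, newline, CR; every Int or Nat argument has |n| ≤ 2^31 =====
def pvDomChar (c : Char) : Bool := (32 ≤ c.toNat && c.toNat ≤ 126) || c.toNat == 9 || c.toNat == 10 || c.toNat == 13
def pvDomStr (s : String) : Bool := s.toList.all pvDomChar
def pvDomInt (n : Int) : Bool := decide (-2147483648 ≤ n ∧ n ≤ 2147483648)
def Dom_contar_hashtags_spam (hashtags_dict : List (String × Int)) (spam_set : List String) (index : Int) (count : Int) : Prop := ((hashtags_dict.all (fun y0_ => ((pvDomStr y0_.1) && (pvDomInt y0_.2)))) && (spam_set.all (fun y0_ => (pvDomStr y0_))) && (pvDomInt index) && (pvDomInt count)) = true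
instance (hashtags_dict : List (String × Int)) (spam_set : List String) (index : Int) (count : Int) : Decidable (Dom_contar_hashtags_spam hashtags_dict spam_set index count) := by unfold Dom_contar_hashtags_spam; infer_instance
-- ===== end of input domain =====

-- B replaces A's tail recursion (which rebuilds the key list each call) with one slice-and-sum
-- comprehension over keys[index:]; on in-range negative index B counts the suffix instead of
-- A's wraparound double count (see D_ below). Objective: simpler.

-- ===== PORT A =====
-- recursive worker = A's body after 'hashtag_keys = list(hashtags_dict.keys())' (recomputing the
-- key list on each call yields the same list, so it is passed along); 'none' = Python IndexError
def contarAux (keys spam : List String) (index count : Int) : Int :=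
  if index ≥ (keys.length : Int) then count
  else
    match PySem.List.pyGet? keys index with
    | none => 0  -- IndexError (excluded by Pre_)
    | some k => contarAux keys spam (index + 1) (if spam.contains k then count + 1 else count)
termination_by ((keys.length : Int) - index).toNat
decreasing_by omega

def contar_hashtags_spam (hashtags_dict : List (String × Int)) (spam_set : List String) (index : Int) (count : Int) : Int :=
  contarAux (PySem.Dict.ofList hashtags_dict).keys spam_set index count

-- ===== PORT B =====
def contar_hashtags_spam_alt (hashtags_dict : List (String × Int)) (spam_set : List String) (index : Int) (count : Int) : Int :=
  let keys := (PySem.Dict.ofList hashtags_dict).keys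
  count + ((PySem.List.slice keys (some index) none).countP (fun k => spam_set.contains k) : Int)

-- ===== PRECONDITION & SPEC =====
-- Pre_ excludes exactly index < -len(keys), where A raises IndexError on hashtag_keys[index]
def Pre_contar_hashtags_spam (hashtags_dict : List (String × Int)) (spam_set : List String) (index : Int) (count : Int) : Prop :=
  -((PySem.Dict.ofList hashtags_dict).keys.length : Int) ≤ index
instance (hashtags_dict : List (String × Int)) (spam_set : List String) (index : Int) (count : Int) : Decidable (Pre_contar_hashtags_spam hashtags_dict spam_set index count) := by unfold Pre_contar_hashtags_spam; infer_instance
def pvWitness_contar_hashtags_spam : (List (String × Int)) × List String × Int × Int := ([("a", 1), ("b", 2)], ["b"], 0, 0)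

-- For a nonempty dict with -len ≤ index < 0 and at least one key in spam_set, A's negative indexing
-- wraps around and then continues through the entire key list, returning count plus the spam keys of
-- keys[index:] plus ALL spam keys again (a double count); B returns count plus the spam keys of
-- keys[index:], the intended suffix count.
def D_contar_hashtags_spam (hashtags_dict : List (String × Int)) (spam_set : List String) (index : Int) (count : Int) : Prop :=
  index < 0 ∧ -((PySem.Dict.ofList hashtags_dict).keys.length : Int) ≤ index ∧
    (PySem.Dict.ofList hashtags_dict).keys.any (fun k => spam_set.contains k) = true
instance (hashtags_dict : List (String × Int)) (spam_set : List String) (index : Int) (count : Int) : Decidable (D_contar_hashtags_spam hashtags_dict spam_set index count) := by unfold D_contar_hashtags_spam; infer_instance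

def Spec_contar_hashtags_spam (hashtags_dict : List (String × Int)) (spam_set : List String) (index : Int) (count : Int) (out : Int) : Prop := ¬ D_contar_hashtags_spam hashtags_dict spam_set index count → out = contar_hashtags_spam_alt hashtags_dict spam_set index count
instance (hashtags_dict : List (String × Int)) (spam_set : List String) (index : Int) (count : Int) (out : Int) : Decidable (Spec_contar_hashtags_spam hashtags_dict spam_set index count out) := by unfold Spec_contar_hashtags_spam; infer_instance

def pvDiffWitness_contar_hashtags_spam : (List (String × Int)) × List String × Int × Int := ([("a", 1)], ["a"], -1, 0)
def pvDiffWitnessOut_contar_hashtags_spam : Int × Int := (2, 1)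

-- ===== CLAIM (what is proved, stated in full; the proofs are below) =====
def Claim_unchanged_contar_hashtags_spam : Prop := ∀ (hashtags_dict : List (String × Int)) (spam_set : List String) (index : Int) (count : Int), Dom_contar_hashtags_spam hashtags_dict spam_set index count → Pre_contar_hashtags_spam hashtags_dict spam_set index count → Spec_contar_hashtags_spam hashtags_dict spam_set index count (contar_hashtags_spam hashtags_dict spam_set index count)
def Claim_changed_contar_hashtags_spam : Prop := Dom_contar_hashtags_spam (pvDiffWitness_contar_hashtags_spam.1) (pvDiffWitness_contar_hashtags_spam.2.1) (pvDiffWitness_contar_hashtags_spam.2.2.1) (pvDiffWitness_contar_hashtags_spam.2.2.2) ∧ Pre_contar_hashtags_spam (pvDiffWitness_contar_hashtags_spam.1) (pvDiffWitness_contar_hashtags_spam.2.1) (pvDiffWitness_contar_hashtags_spam.2.2.1) (pvDiffWitness_contar_hashtags_spam.2.2.2) ∧ D_contar_hashtags_spam (pvDiffWitness_contar_hashtags_spam.1) (pvDiffWitness_contar_hashtags_spam.2.1) (pvDiffWitness_contar_hashtags_spam.2.2.1) (pvDiffWitness_contar_hashtags_spam.2.2.2) ∧ contar_hashtags_spam (pvDiffWitness_contar_hashtags_spam.1)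 (pvDiffWitness_contar_hashtags_spam.2.1) (pvDiffWitness_contar_hashtags_spam.2.2.1) (pvDiffWitness_contar_hashtags_spam.2.2.2) = pvDiffWitnessOut_contar_hashtags_spam.1 ∧ contar_hashtags_spam_alt (pvDiffWitness_contar_hashtags_spam.1) (pvDiffWitness_contar_hashtags_spam.2.1) (pvDiffWitness_contar_hashtags_spam.2.2.1) (pvDiffWitness_contar_hashtags_spam.2.2.2) = pvDiffWitnessOut_contar_hashtags_spam.2 ∧ pvDiffWitnessOut_contar_hashtags_spam.1 ≠ pvDiffWitnessOut_contar_hashtags_spam.2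
def Claim_exact_contar_hashtags_spam : Prop := ∀ (hashtags_dict : List (String × Int)) (spam_set : List String) (index : Int) (count : Int), Dom_contar_hashtags_spam hashtags_dict spam_set index count → Pre_contar_hashtags_spam hashtags_dict spam_set index count → D_contar_hashtags_spam hashtags_dict spam_set index count → contar_hashtags_spam hashtags_dict spam_set index count ≠ contar_hashtags_spam_alt hashtags_dict spam_set index count

-- ===== LEMMAS AND PROOFS =====

-- A's worker on a nonnegative index counts the spam keys of the suffix keys[index:]
theorem contarAux_nonneg (keys spam : List String) (index count : Int) (h : 0 ≤ index) :
    contarAux keys spam index count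
      = count + ((keys.drop index.toNat).countP (fun k => spam.contains k) : Int) := by
  fun_induction contarAux keys spam index count with
  | case1 index count hge =>
      rw [List.drop_eq_nil_of_le (by omega)]
      simp
  | case2 index count hge hnone =>
      rw [PySem.List.pyGet?_eq_none_iff] at hnone
      exact absurd ⟨by omega, by omega⟩ hnone
  | case3 index count hge k hk ih =>
      have hlen : index.toNat < keys.length := by
        omega
      rw [PySem.List.pyGet?_eq_some_getElem _ h (by omega)] at hk
      have hdrop : keys.drop index.toNat = k :: keys.drop (index + 1).toNat := by
        have ht : (index + 1).toNat = index.toNat + 1 := by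
          omega
        rw [ht, List.drop_eq_getElem_cons hlen, Option.some_inj.mp hk]
      have ih' := ih (by omega)
      by_cases hmem : spam.contains k = true
      · rw [dif_pos hmem] at ih'
        rw [if_pos hmem, ih', hdrop, List.countP_cons, if_pos hmem]
        push_cast
        omega
      · rw [dif_neg hmem] at ih'
        rw [if_neg hmem, ih', hdrop, List.countP_cons, if_neg hmem]
        push_cast
        omega

-- A's worker on an in-range negative index: the suffix count plus a full extra pass
theorem contarAux_neg (keys spam : List String) (index count : Int)
    (hlo : -(keys.length : Int) ≤ index) (hhi : index < 0) :
    contarAux keys spam index count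
      = count + ((keys.drop ((keys.length : Int) + index).toNat).countP (fun k => spam.contains k) : Int)
          + (keys.countP (fun k => spam.contains k) : Int) := by
  fun_induction contarAux keys spam index count with
  | case1 index count hge => omega
  | case2 index count hge hnone =>
      rw [PySem.List.pyGet?_eq_none_iff] at hnone
      exact absurd ⟨by omega, by omega⟩ hnone
  | case3 index count hge k hk ih =>
      have hlen : ((keys.length : Int) + index).toNat < keys.length := by
        omega
      have hkval : k = keys[((keys.length : Int) + index).toNat] := by
        -- keys[index] for -len ≤ index < 0 is keys[len + index]
        have h1 : PySem.List.pyGet? keys (-(((-index).toNat : Nat) : Int))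
            = keys[(keys.length - (-index).toNat)]? :=
          PySem.List.pyGet?_neg_natCast keys ((-index).toNat) (by omega) (by omega)
        have h2 : (-(((-index).toNat : Nat) : Int)) = index := by
          omega
        rw [h2] at h1
        rw [h1] at hk
        have h3 : keys.length - (-index).toNat = ((keys.length : Int) + index).toNat := by
          omega
        rw [h3, List.getElem?_eq_getElem hlen] at hk
        exact (Option.some_inj.mp hk).symm
      have hdrop : keys.drop ((keys.length : Int) + index).toNat
          = k :: keys.drop (((keys.length : Int) + index).toNat + 1) := by
        rw [List.drop_eq_getElem_cons hlen, ← hkval]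
      by_cases hz : index + 1 = 0
      · -- the next call starts A's full extra pass at index 0
        have hnil : keys.drop (((keys.length : Int) + index).toNat + 1) = [] :=
          List.drop_eq_nil_of_le (by omega)
        rw [hz, contarAux_nonneg keys spam 0 _ le_rfl, Int.toNat_zero, List.drop_zero, hdrop, hnil]
        by_cases hmem : spam.contains k = true
        · rw [if_pos hmem, List.countP_cons, if_pos hmem, List.countP_nil]
          push_cast
          omega
        · rw [if_neg hmem, List.countP_cons, if_neg hmem, List.countP_nil]
          push_cast
          omega
      · have hstep : keys.drop (((keys.length : Int) + index).toNat + 1)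
            = keys.drop ((keys.length : Int) + (index + 1)).toNat := by
          congr 1
          omega
        have ih' := ih (by omega) (by omega)
        by_cases hmem : spam.contains k = true
        · rw [dif_pos hmem] at ih'
          rw [if_pos hmem, ih', hstep.symm, hdrop, List.countP_cons, if_pos hmem]
          push_cast
          omega
        · rw [dif_neg hmem] at ih'
          rw [if_neg hmem, ih', hstep.symm, hdrop, List.countP_cons, if_neg hmem]
          push_cast
          omega

-- B = count + spam keys of keys[index:] (Python slice semantics), for any in-range index
theorem alt_eval (hashtags_dict : List (String × Int)) (spam_set : List String) (index count : Int)
    (hlo : -(((PySem.Dict.ofList hashtags_dict).keys.length : Int)) ≤ index) :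
    contar_hashtags_spam_alt hashtags_dict spam_set index count
      = count + (((PySem.Dict.ofList hashtags_dict).keys.drop
          (if 0 ≤ index then index.toNat else ((((PySem.Dict.ofList hashtags_dict).keys.length : Int)) + index).toNat)).countP
            (fun k => spam_set.contains k) : Int) := by
  simp only [contar_hashtags_spam_alt]
  by_cases h : 0 ≤ index
  · rw [PySem.List.slice_from _ h]
    simp [h]
  · rw [PySem.List.slice_some_none]
    have hc : PySem.List.clampIdx (PySem.Dict.ofList hashtags_dict).keys.length index
        = (((PySem.Dict.ofList hashtags_dict).keys.length : Int) + index).toNat := by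
      have hk : index = -(((-index).toNat : Nat) : Int) := by omega
      rw [hk, PySem.List.clampIdx_neg_natCast _ _ (by omega)]
      omega
    rw [hc]
    simp [h]

theorem contar_hashtags_spam_spec : Claim_unchanged_contar_hashtags_spam := by
  intro hd ss i c _ hPre hnD
  unfold Pre_contar_hashtags_spam at hPre
  unfold contar_hashtags_spam
  by_cases h : 0 ≤ i
  · rw [contarAux_nonneg _ _ _ _ h, alt_eval _ _ _ _ hPre]
    simp [h]
  · -- in-range negative index outside D_: no key is in spam_set, both extra counts vanish
    have hany : ¬ ((PySem.Dict.ofList hd).keys.any (fun k => ss.contains k) = true) := by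
      intro hA
      exact hnD ⟨by omega, hPre, hA⟩
    have hall : ∀ x ∈ (PySem.Dict.ofList hd).keys, ¬ (ss.contains x = true) := by
      intro x hx hc2
      exact hany (List.any_eq_true.mpr ⟨x, hx, hc2⟩)
    have hz : (PySem.Dict.ofList hd).keys.countP (fun k => ss.contains k) = 0 :=
      List.countP_eq_zero.mpr hall
    have hz2 : ((PySem.Dict.ofList hd).keys.drop
        ((((PySem.Dict.ofList hd).keys.length : Int)) + i).toNat).countP (fun k => ss.contains k) = 0 :=
      List.countP_eq_zero.mpr (fun x hx => hall x (List.mem_of_mem_drop hx))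
    rw [contarAux_neg _ _ _ _ hPre (by omega), alt_eval _ _ _ _ hPre,
      if_neg (not_le.mpr (by omega : i < 0))]
    omega

theorem contar_hashtags_spam_changed : Claim_changed_contar_hashtags_spam := by
  unfold Claim_changed_contar_hashtags_spam
  refine ⟨by decide, by decide, by decide, ?_, by decide, by decide⟩
  show contar_hashtags_spam [("a", 1)] ["a"] (-1) 0 = 2
  unfold contar_hashtags_spam
  rw [contarAux_neg _ _ _ _ (by decide) (by decide)]
  decide

theorem contar_hashtags_spam_tight : Claim_exact_contar_hashtags_spam := by
  intro hd ss i c _ hPre hD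
  obtain ⟨hneg, hlo, hany⟩ := hD
  unfold contar_hashtags_spam
  obtain ⟨x, hx, hc2⟩ := List.any_eq_true.mp hany
  have hpos : 0 < (PySem.Dict.ofList hd).keys.countP (fun k => ss.contains k) :=
    List.countP_pos_iff.mpr ⟨x, hx, hc2⟩
  rw [contarAux_neg _ _ _ _ hlo hneg, alt_eval _ _ _ _ hlo]
  rw [if_neg (not_le.mpr hneg)]
  omega
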